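-- pv_equiv track=rewrite | github.com/miliar/Code_Jam_Webscraper | solutions_python/solutions_year13_round0_nr3/1169.py | is_fair
-- ===== SOURCE A (Python) =====
-- from collections import deque
--
-- def is_fair(num):
-- 	if num < 10:
-- 		return True
--
-- 	pipe = deque()
-- 	digit = num
-- 	while digit > 0:
-- 		pipe.append(digit % 10)
-- 		digit = (int)(digit / 10)
--
-- 	while len(pipe) > 1:
-- 		left = pipe.pop()
-- 		right = pipe.popleft()
-- 		if left != right:
-- 			return False
--
-- 	return True
-- ===== SOURCE B (Python) =====
-- def is_fair(num):
--     if num < 10: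
--         return True
--     s = str(num)
--     return s == s[::-1]
-- ===== Notes on version B (the rewrite author's own statement) =====
-- stated objective: idiomatic
-- what changed: Replaces the arithmetic digit extraction into a deque plus a two-pointer pop/popleft comparison loop with the standard string idiom s == s[::-1] on str(num), keeping A's small-number guard first.
import Mathlib
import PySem

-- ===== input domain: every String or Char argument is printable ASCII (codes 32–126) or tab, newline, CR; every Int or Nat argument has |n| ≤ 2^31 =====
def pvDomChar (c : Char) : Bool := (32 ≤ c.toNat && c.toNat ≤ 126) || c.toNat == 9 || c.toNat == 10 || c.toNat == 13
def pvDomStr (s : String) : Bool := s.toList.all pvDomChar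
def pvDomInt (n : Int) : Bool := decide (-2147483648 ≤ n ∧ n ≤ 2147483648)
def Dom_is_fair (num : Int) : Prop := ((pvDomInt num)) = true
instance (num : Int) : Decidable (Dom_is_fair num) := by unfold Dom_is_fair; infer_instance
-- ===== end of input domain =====

-- B replaces A's deque digit extraction + two-pointer comparison by the string idiom s == s[::-1] (idiomatic, same cost).

-- ===== PORT A =====
-- first while loop: extract digits low-to-high, appending to the deque
def pipeLoop (digit : Int) (pipe : List Int) : List Int :=
  if 0 < digit then
    pipeLoop (PySem.Int.truncdiv digit 10) (pipe ++ [PySem.Int.mod digit 10])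
  else pipe
termination_by digit.toNat
decreasing_by
  rename_i h
  simp only [PySem.Int.truncdiv, Int.tdiv_eq_ediv_of_nonneg (le_of_lt h)]
  omega

-- second while loop: pop (left = last), popleft (right = first) while length > 1, comparing
def cmpLoop (pipe : List Int) : Bool :=
  match pipe with
  | [] => true
  | [_] => true
  | x :: y :: rest =>
    let left := (x :: y :: rest).getLast (by simp)
    if left ≠ x then false
    else cmpLoop ((y :: rest).dropLast)
termination_by pipe.length
decreasing_by simp

def is_fair (num : Int) : Bool :=
  if num < 10 then true
  else cmpLoop (pipeLoop num [])

-- ===== PORT B =====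
-- s[::-1] is PySem.Str.slice? s none none (-1); Python's slice with step -1 always succeeds,
-- so the equality test s == s[::-1] is Option-equality against some s.
def is_fair_alt (num : Int) : Bool :=
  if num < 10 then true
  else PySem.Str.slice? (PySem.Int.toStr num) none none (-1) == some (PySem.Int.toStr num)

-- ===== PRECONDITION & SPEC =====
def Spec_is_fair (num : Int) (out : Bool) : Prop := out = is_fair_alt num
instance (num : Int) (out : Bool) : Decidable (Spec_is_fair num out) := by unfold Spec_is_fair; infer_instance

-- ===== CLAIM (what is proved, stated in full; the proofs are below) =====
def Claim_equal_is_fair : Prop := ∀ (num : Int), Dom_is_fair num → Spec_is_fair num (is_fair num)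

-- ===== LEMMAS AND PROOFS =====

-- A's extraction loop produces the little-endian decimal digits of the number.
theorem pipeLoop_eq (m : Nat) : ∀ (acc : List Int),
    pipeLoop (m : Int) acc = acc ++ (Nat.digits 10 m).map (fun k : Nat => (k : Int)) := by
  induction m using Nat.strong_induction_on with
  | _ m ih =>
    intro acc
    rw [pipeLoop]
    by_cases hm : 0 < m
    · have hpos : (0 : Int) < (m : Int) := by exact_mod_cast hm
      simp only [hpos, if_true]
      have hdiv : PySem.Int.truncdiv (m : Int) 10 = ((m / 10 : Nat) : Int) := by
        simp [PySem.Int.truncdiv, Int.tdiv_eq_ediv_of_nonneg (le_of_lt hpos)]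
      have hmod : PySem.Int.mod (m : Int) 10 = ((m % 10 : Nat) : Int) := by
        simp [PySem.Int.mod, Int.fmod_eq_emod]
      rw [hdiv, hmod, ih (m / 10) (Nat.div_lt_self hm (by norm_num))]
      rw [Nat.digits_def' (by norm_num : 1 < 10) hm]
      simp
    · have h0 : m = 0 := by omega
      subst h0
      simp

-- A's comparison loop is exactly the palindrome test on the list.
theorem cmpLoop_eq (pipe : List Int) : cmpLoop pipe = decide (pipe.reverse = pipe) := by
  induction hL : pipe.length using Nat.strong_induction_on generalizing pipe with
  | _ L ih =>
    match pipe with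
    | [] => simp [cmpLoop]
    | [x] => simp [cmpLoop]
    | x :: y :: rest =>
      have hex : ∃ (m : List Int) (z : Int), y :: rest = m ++ [z] :=
        ⟨(y :: rest).dropLast, (y :: rest).getLast (by simp),
          (List.dropLast_concat_getLast (by simp)).symm⟩
      obtain ⟨m, z, hm⟩ := hex
      rw [cmpLoop]
      simp only [hm]
      have hlast : ∀ (h : x :: (m ++ [z]) ≠ []), (x :: (m ++ [z])).getLast h = z := by
        intro h; simp
      simp only [hlast]
      have hrev : (x :: (m ++ [z])).reverse = z :: (m.reverse ++ [x]) := by simp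
      by_cases hzx : z = x
      · rw [if_neg (not_not_intro hzx)]
        rw [show (m ++ [z]).dropLast = m by simp]
        rw [ih m.length (by subst hL; simp [hm]) m rfl]
        apply decide_eq_decide.mpr
        rw [hrev, hzx]
        constructor
        · intro h; rw [h]
        · intro h
          injection h with _ h2
          simpa using h2
      · rw [if_pos (by simpa using hzx)]
        have hne : (x :: (m ++ [z])).reverse ≠ x :: (m ++ [z]) := by
          rw [hrev]
          intro hcontra
          exact hzx (by injection hcontra)
        exact (decide_eq_false hne).symm

-- digitChar is injective on digits < 10 (left inverse: subtract '0')
theorem map_digitChar_palindrome_iff (ds : List Nat) (h : ∀ x ∈ ds, x < 10) :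
    ((ds.map Nat.digitChar).reverse = ds.map Nat.digitChar) ↔ (ds.reverse = ds) := by
  constructor
  · intro hc
    have hg : ∀ x ∈ ds, (fun c : Char => c.toNat - 48) (Nat.digitChar x) = x := by
      intro x hx
      have := h x hx
      interval_cases x <;> rfl
    have hmap : (ds.map Nat.digitChar).map (fun c : Char => c.toNat - 48) = ds := by
      rw [List.map_map]
      exact (List.map_congr_left hg).trans (List.map_id ds)
    have := congrArg (List.map (fun c : Char => c.toNat - 48)) hc
    rwa [List.map_reverse, hmap] at this
  · intro hd
    rw [← List.map_reverse, hd]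

-- Int coercion is injective, so the same holds for the Int digit list.
theorem map_intCast_palindrome_iff (ds : List Nat) :
    ((ds.map (fun k : Nat => (k : Int))).reverse = ds.map (fun k : Nat => (k : Int))) ↔ (ds.reverse = ds) := by
  constructor
  · intro hc
    have hinj : Function.Injective (fun k : Nat => (k : Int)) := fun a b h => by simpa using h
    rw [← List.map_reverse] at hc
    exact List.map_injective_iff.mpr hinj hc
  · intro hd
    rw [← List.map_reverse, hd]

-- Nat.toDigits is the big-endian digit-character list.
theorem toDigitsCore_eq (f : Nat) : ∀ (n : Nat) (l : List Char), 0 < n → n ≤ f →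
    Nat.toDigitsCore 10 f n l = ((Nat.digits 10 n).map Nat.digitChar).reverse ++ l := by
  induction f with
  | zero => intro n l hn hf; omega
  | succ f ih =>
    intro n l hn hf
    rw [Nat.toDigitsCore]
    by_cases hq : n / 10 = 0
    · rw [if_pos hq]
      rw [Nat.digits_def' (by norm_num : 1 < 10) hn, hq]
      simp
    · rw [if_neg hq]
      rw [ih (n / 10) _ (Nat.pos_of_ne_zero hq) (by omega)]
      rw [Nat.digits_def' (by norm_num : 1 < 10) hn]
      simp

theorem toDigits_eq (n : Nat) (hn : 0 < n) :
    Nat.toDigits 10 n = ((Nat.digits 10 n).map Nat.digitChar).reverse := by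
  rw [Nat.toDigits, toDigitsCore_eq (n + 1) n [] hn (by omega)]
  simp

-- ===== VERDICT (by name: the statement is the Claim_ definition above) =====
theorem is_fair_spec : Claim_equal_is_fair := by
  intro num _
  unfold Spec_is_fair is_fair is_fair_alt
  by_cases hlt : num < 10
  · simp [hlt]
  · rw [if_neg hlt, if_neg hlt]
    have h10 : (10 : Int) ≤ num := not_lt.mp hlt
    have hm : num = ((num.toNat : Nat) : Int) := by omega
    set n := num.toNat with hn
    have hnpos : 0 < n := by omega
    rw [hm, pipeLoop_eq n [], cmpLoop_eq]
    rw [PySem.Str.slice?_none_none_neg_one]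
    -- reduce both sides to 'decide' of the digit-list palindrome condition
    have hs : PySem.Int.toStr ((n : Nat) : Int)
        = String.ofList ((Nat.digits 10 n).map Nat.digitChar).reverse := by
      simp [PySem.Int.toStr, PySem.Int.toChars, toDigits_eq n hnpos]
      rw [if_neg (by omega : ¬ ((n : Nat) : Int) < 0)]
    have hdl : ∀ x ∈ Nat.digits 10 n, x < 10 := fun x hx =>
      Nat.digits_lt_base (by norm_num) hx
    have hrhs : (some (String.ofList (PySem.Int.toStr ((n : Nat) : Int)).toList.reverse)
        == some (PySem.Int.toStr ((n : Nat) : Int)))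
        = decide ((Nat.digits 10 n).reverse = Nat.digits 10 n) := by
      have h1 : (some (String.ofList (PySem.Int.toStr ((n : Nat) : Int)).toList.reverse)
          == some (PySem.Int.toStr ((n : Nat) : Int)))
          = (String.ofList (PySem.Int.toStr ((n : Nat) : Int)).toList.reverse
          == PySem.Int.toStr ((n : Nat) : Int)) := rfl
      rw [h1, Bool.beq_eq_decide_eq]
      apply decide_eq_decide.mpr
      rw [hs, String.toList_ofList, List.reverse_reverse, String.ofList_inj, eq_comm]
      exact map_digitChar_palindrome_iff (Nat.digits 10 n) hdl
    rw [hrhs]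
    simp only [List.nil_append]
    exact decide_eq_decide.mpr (map_intCast_palindrome_iff (Nat.digits 10 n))
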